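-- pv_equiv track=rewrite | github.com/neo-rs/MWBots | MWDataManagerBot/classifier.py | order_link_types
-- ===== SOURCE A (Python) =====
-- from typing import Any, Dict, List, Optional, Tuple
--
-- def order_link_types(link_types: List[Tuple[int, str]]) -> Tuple[List[Tuple[int, str]], bool]:
--     """Dispatch order helper (kept compatible with monolith shape)."""
--     if not link_types:
--         return [], False
--     # Maintain original behavior: if PRICE_ERROR is present, treat it as primary and others as fallback.
--     tag_set = {tag for _, tag in link_types}
--     primary = list(link_types)
--     fallback: List[Tuple[int, str]] = []
--     if "PRICE_ERROR" in tag_set: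
--         primary = [(cid, tag) for cid, tag in link_types if tag == "PRICE_ERROR"]
--         fallback = [(cid, tag) for cid, tag in link_types if tag != "PRICE_ERROR"]
--     ordered = primary + fallback
--     stop_after_first = bool("PRICE_ERROR" in tag_set)
--     return ordered, stop_after_first
-- ===== SOURCE B (Python) =====
-- def order_link_types(link_types):
--     """Dispatch order helper: one stable sort instead of set-build + two filter passes."""
--     stop_after_first = any(tag == "PRICE_ERROR" for _, tag in link_types)
--     ordered = sorted(link_types, key=lambda ct: ct[1] != "PRICE_ERROR")
--     return ordered, stop_after_first
-- ===== Notes on version B (the rewrite author's own statement) =====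
-- stated objective: simpler
-- what changed: Replaces the set-build plus two filter-comprehension partition with a single stable sort on the boolean key (tag != 'PRICE_ERROR') and an any() for the flag; the empty-list special case disappears.
import Mathlib
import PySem

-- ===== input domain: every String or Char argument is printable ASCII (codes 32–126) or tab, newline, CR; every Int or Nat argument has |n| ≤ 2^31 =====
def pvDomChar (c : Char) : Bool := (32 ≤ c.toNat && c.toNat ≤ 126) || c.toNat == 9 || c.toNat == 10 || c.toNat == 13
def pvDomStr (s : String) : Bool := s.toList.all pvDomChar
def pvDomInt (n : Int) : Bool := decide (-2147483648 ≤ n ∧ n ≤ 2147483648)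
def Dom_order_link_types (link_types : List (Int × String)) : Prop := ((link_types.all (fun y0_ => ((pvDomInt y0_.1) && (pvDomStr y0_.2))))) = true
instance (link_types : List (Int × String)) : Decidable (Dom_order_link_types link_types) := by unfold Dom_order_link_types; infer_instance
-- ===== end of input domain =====

-- B replaces A's set-build plus two filter passes by one stable sort on a boolean key plus any(); simpler, same result.

-- ===== PORT A =====
def order_link_types (link_types : List (Int × String)) : (List (Int × String)) × Bool :=
  if link_types = [] then ([], false)
  else
    let tag_set := PySem.Set.ofList (link_types.map (fun p => p.2))
    let pf :=
      if ("PRICE_ERROR" : String) ∈ tag_set then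
        (link_types.filter (fun ct => ct.2 == "PRICE_ERROR"),
         link_types.filter (fun ct => ct.2 != "PRICE_ERROR"))
      else (link_types, ([] : List (Int × String)))
    let ordered := pf.1 ++ pf.2
    let stop_after_first := decide (("PRICE_ERROR" : String) ∈ tag_set)
    (ordered, stop_after_first)

-- ===== PORT B =====
-- key ct.2 != "PRICE_ERROR" is a Python bool; bools sort as the ints 0 < 1
def pvKeyB (ct : Int × String) : Nat := if ct.2 ≠ "PRICE_ERROR" then 1 else 0

def order_link_types_alt (link_types : List (Int × String)) : (List (Int × String)) × Bool :=
  let stop_after_first := link_types.any (fun ct => ct.2 == "PRICE_ERROR")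
  let ordered := PySem.List.sorted link_types pvKeyB false
  (ordered, stop_after_first)

-- ===== PRECONDITION & SPEC =====
def Spec_order_link_types (link_types : List (Int × String)) (out : (List (Int × String)) × Bool) : Prop := out = order_link_types_alt link_types
instance (link_types : List (Int × String)) (out : (List (Int × String)) × Bool) : Decidable (Spec_order_link_types link_types out) := by unfold Spec_order_link_types; infer_instance

-- ===== CLAIM (what is proved, stated in full; the proofs are below) =====
def Claim_equal_order_link_types : Prop := ∀ (link_types : List (Int × String)), Dom_order_link_types link_types → Spec_order_link_types link_types (order_link_types link_types)

-- ===== LEMMAS AND PROOFS =====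

-- inserting a key-0 element into (all key-0) ++ (all key-1) puts it between the blocks
lemma insertBy_key0 (x : Int × String) (as bs : List (Int × String))
    (hx : pvKeyB x = 0) (has : ∀ a ∈ as, pvKeyB a = 0) (hbs : ∀ b ∈ bs, pvKeyB b = 1) :
    PySem.List.insertBy (fun a b => decide (pvKeyB a < pvKeyB b)) x (as ++ bs) = as ++ x :: bs := by
  induction as with
  | nil =>
    cases bs with
    | nil => rfl
    | cons b bs' =>
      simp [PySem.List.insertBy, hx, hbs b (by simp)]
  | cons a as' ih =>
    have ha : pvKeyB a = 0 := has a (by simp)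
    simp [PySem.List.insertBy, hx, ha]
    exact ih (fun a h => has a (by simp [h]))

-- inserting a key-1 element appends at the end (keys are ≤ 1)
lemma insertBy_key1 (x : Int × String) (l : List (Int × String)) (hx : pvKeyB x = 1) :
    PySem.List.insertBy (fun a b => decide (pvKeyB a < pvKeyB b)) x l = l ++ [x] := by
  apply PySem.List.insertBy_of_forall_not_before
  intro y _
  have : pvKeyB y ≤ 1 := by unfold pvKeyB; split <;> omega
  simp [hx]; omega

-- the insertion-sort fold over the two-valued key is the stable partition
lemma foldl_insertBy_partition (xs : List (Int × String)) (as bs : List (Int × String))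
    (has : ∀ a ∈ as, pvKeyB a = 0) (hbs : ∀ b ∈ bs, pvKeyB b = 1) :
    xs.foldl (fun acc x => PySem.List.insertBy (fun a b => decide (pvKeyB a < pvKeyB b)) x acc) (as ++ bs)
      = (as ++ xs.filter (fun ct => ct.2 == "PRICE_ERROR")) ++ (bs ++ xs.filter (fun ct => ct.2 != "PRICE_ERROR")) := by
  induction xs generalizing as bs with
  | nil => simp
  | cons x xs' ih =>
    by_cases hx : x.2 = "PRICE_ERROR"
    · have hk : pvKeyB x = 0 := by simp [pvKeyB, hx]
      have h1 : ∀ a ∈ as ++ [x], pvKeyB a = 0 := by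
        intro a h; rcases List.mem_append.mp h with h | h
        · exact has a h
        · simp at h; simp [h, hk]
      calc (x :: xs').foldl (fun acc x => PySem.List.insertBy (fun a b => decide (pvKeyB a < pvKeyB b)) x acc) (as ++ bs)
          = xs'.foldl (fun acc x => PySem.List.insertBy (fun a b => decide (pvKeyB a < pvKeyB b)) x acc) ((as ++ [x]) ++ bs) := by
            simp [List.foldl_cons, insertBy_key0 x as bs hk has hbs]
        _ = ((as ++ [x]) ++ xs'.filter (fun ct => ct.2 == "PRICE_ERROR")) ++ (bs ++ xs'.filter (fun ct => ct.2 != "PRICE_ERROR")) :=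
            ih (as ++ [x]) bs h1 hbs
        _ = (as ++ (x :: xs').filter (fun ct => ct.2 == "PRICE_ERROR")) ++ (bs ++ (x :: xs').filter (fun ct => ct.2 != "PRICE_ERROR")) := by
            simp [hx]
    · have hk : pvKeyB x = 1 := by simp [pvKeyB, hx]
      have h1 : ∀ b ∈ bs ++ [x], pvKeyB b = 1 := by
        intro b h; rcases List.mem_append.mp h with h | h
        · exact hbs b h
        · simp at h; simp [h, hk]
      calc (x :: xs').foldl (fun acc x => PySem.List.insertBy (fun a b => decide (pvKeyB a < pvKeyB b)) x acc) (as ++ bs)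
          = xs'.foldl (fun acc x => PySem.List.insertBy (fun a b => decide (pvKeyB a < pvKeyB b)) x acc) (as ++ (bs ++ [x])) := by
            simp [List.foldl_cons, insertBy_key1 x (as ++ bs) hk]
        _ = (as ++ xs'.filter (fun ct => ct.2 == "PRICE_ERROR")) ++ ((bs ++ [x]) ++ xs'.filter (fun ct => ct.2 != "PRICE_ERROR")) :=
            ih as (bs ++ [x]) has h1
        _ = (as ++ (x :: xs').filter (fun ct => ct.2 == "PRICE_ERROR")) ++ (bs ++ (x :: xs').filter (fun ct => ct.2 != "PRICE_ERROR")) := by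
            simp [hx]

lemma sorted_keyB_eq_partition (xs : List (Int × String)) :
    PySem.List.sorted xs pvKeyB false
      = xs.filter (fun ct => ct.2 == "PRICE_ERROR") ++ xs.filter (fun ct => ct.2 != "PRICE_ERROR") := by
  rw [PySem.List.sorted_eq_foldl_insertBy]
  simpa using foldl_insertBy_partition xs [] [] (by simp) (by simp)

-- ===== VERDICT (by name: the statement is the Claim_ definition above) =====
theorem order_link_types_spec : Claim_equal_order_link_types := by
  intro l _
  unfold Spec_order_link_types order_link_types order_link_types_alt
  by_cases hmem : ("PRICE_ERROR" : String) ∈ PySem.Set.ofList (l.map (fun p => p.2))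
  · have hany : l.any (fun ct => ct.2 == "PRICE_ERROR") = true := by
      rw [PySem.Set.mem_ofList] at hmem
      rcases List.mem_map.mp hmem with ⟨p, hp, hp2⟩
      exact List.any_eq_true.mpr ⟨p, hp, by simp [hp2]⟩
    have hne : l ≠ [] := by
      intro h; rw [h] at hmem; simp at hmem
    simp only [if_neg hne, sorted_keyB_eq_partition, hany, hmem]
    simp
  · have hany : l.any (fun ct => ct.2 == "PRICE_ERROR") = false := by
      rw [PySem.Set.mem_ofList] at hmem
      simp only [List.any_eq_false]
      intro p hp
      simp only [beq_iff_eq]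
      intro h; exact hmem (List.mem_map.mpr ⟨p, hp, h⟩)
    have hf0 : l.filter (fun ct => ct.2 == "PRICE_ERROR") = [] := by
      rw [List.filter_eq_nil_iff]
      intro p hp
      have := List.any_eq_false.mp hany p hp; simpa using this
    have hf1 : l.filter (fun ct => ct.2 != "PRICE_ERROR") = l := by
      rw [List.filter_eq_self]
      intro p hp
      have := List.any_eq_false.mp hany p hp; simpa using this
    by_cases hnil : l = []
    · subst hnil; simp [sorted_keyB_eq_partition]
    · simp only [if_neg hnil, sorted_keyB_eq_partition, hf0, hf1, hany, hmem]
      simp
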